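-- pv_equiv track=rewrite | github.com/Vaderico/LSTM-Camera-Game | create_stair_data.py | step_vel_file
-- ===== SOURCE A (Python) =====
-- def step_vel_file(step):
--     file = []
--     small = True
--     for i in range(100):
--         if i % step is 0:
--             small = not small
--         if (small):
--             file.append([6,0])
--         else:
--             file.append([0,6])
--     return file
-- ===== SOURCE B (Python) =====
-- def step_vel_file(step):
--     a = abs(step)
--     return [[6, 0] if (i // a) % 2 == 1 else [0, 6] for i in range(100)]
-- ===== Notes on version B (the rewrite author's own statement) =====
-- stated objective: simpler
-- what changed: Replaced the mutable 'small' toggle accumulator with a direct per-index closed form: entry i is [6,0] iff (i // abs(step)) is odd, emitted by a single comprehension.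
-- outside the precondition, e.g. on step_vel_file(0): A raises ZeroDivisionError, B raises ZeroDivisionError
import Mathlib
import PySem

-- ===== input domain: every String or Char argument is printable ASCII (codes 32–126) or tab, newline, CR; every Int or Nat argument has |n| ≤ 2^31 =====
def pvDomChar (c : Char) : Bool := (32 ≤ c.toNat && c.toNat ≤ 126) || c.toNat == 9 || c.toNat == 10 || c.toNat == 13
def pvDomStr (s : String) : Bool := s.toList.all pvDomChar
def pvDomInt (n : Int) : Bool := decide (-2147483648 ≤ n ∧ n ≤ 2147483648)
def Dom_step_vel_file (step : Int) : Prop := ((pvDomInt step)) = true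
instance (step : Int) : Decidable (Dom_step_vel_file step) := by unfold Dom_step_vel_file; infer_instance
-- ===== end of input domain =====

-- B drops A's mutable 'small' toggle for a stateless per-index parity formula (simpler decomposition; same cost).

-- ===== PORT A =====
def step_vel_file (step : Int) : List (List Int) :=
  (((PySem.List.pyRange 0 100 1).foldl
    (fun (st : List (List Int) × Bool) i =>
      let small := if PySem.Int.mod i step = 0 then !st.2 else st.2
      (st.1 ++ [if small then [6, 0] else [0, 6]], small))
    ([], true))).1

-- ===== PORT B =====
def step_vel_file_alt (step : Int) : List (List Int) :=
  let a : Int := |step|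
  (PySem.List.pyRange 0 100 1).map (fun i =>
    if PySem.Int.mod (PySem.Int.floordiv i a) 2 = 1 then [6, 0] else [0, 6])

-- ===== PRECONDITION & SPEC =====
-- Pre_ excludes step = 0, on which the Python A raises ZeroDivisionError at i % step (B raises there too).
def Pre_step_vel_file (step : Int) : Prop := step ≠ 0
instance (step : Int) : Decidable (Pre_step_vel_file step) := by unfold Pre_step_vel_file; infer_instance
def pvWitness_step_vel_file : Int := (3)
def Spec_step_vel_file (step : Int) (out : List (List Int)) : Prop := out = step_vel_file_alt step
instance (step : Int) (out : List (List Int)) : Decidable (Spec_step_vel_file step out) := by unfold Spec_step_vel_file; infer_instance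

-- ===== CLAIM (what is proved, stated in full; the proofs are below) =====
def Claim_equal_step_vel_file : Prop := ∀ (step : Int), Dom_step_vel_file step → Pre_step_vel_file step → Spec_step_vel_file step (step_vel_file step)

-- ===== LEMMAS AND PROOFS =====

-- Invariant for A's loop: after processing indices 0..n-1, the accumulated list is the
-- per-index parity map and the 'small' flag equals the parity at the last processed index.
theorem step_vel_loopA_eq (step : Int) (hs : step ≠ 0) (n : Nat) :
    (PySem.List.pyRange 0 (n : Int) 1).foldl
      (fun (st : List (List Int) × Bool) i =>
        let small := if PySem.Int.mod i step = 0 then !st.2 else st.2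
        (st.1 ++ [if small then [6, 0] else [0, 6]], small))
      ([], true)
    = ((List.range n).map
        (fun k => if (k / step.natAbs) % 2 = 1 then ([6, 0] : List Int) else [0, 6]),
       if n = 0 then true else decide (((n - 1) / step.natAbs) % 2 = 1)) := by
  have ha : 0 < step.natAbs := Int.natAbs_pos.mpr hs
  induction n with
  | zero => simp
  | succ n ih =>
    have hstep : PySem.List.pyRange 0 ((n : Int) + 1) 1
        = PySem.List.pyRange 0 (n : Int) 1 ++ [(n : Int)] :=
      PySem.List.pyRange_one_succ_right (by positivity)
    have hdvd : (PySem.Int.mod (n : Int) step = 0) ↔ (step.natAbs ∣ n) := by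
      rw [PySem.Int.mod_eq_zero_iff_dvd]
      constructor
      · intro h
        exact Int.natCast_dvd_natCast.mp ((Int.natAbs_dvd).mpr h)
      · intro h
        exact (Int.natAbs_dvd).mp (Int.natCast_dvd_natCast.mpr h)
    have hsmall : (if PySem.Int.mod (n : Int) step = 0
          then !(if n = 0 then true else decide (((n - 1) / step.natAbs) % 2 = 1))
          else (if n = 0 then true else decide (((n - 1) / step.natAbs) % 2 = 1)))
        = decide ((n / step.natAbs) % 2 = 1) := by
      cases n with
      | zero =>
        have : PySem.Int.mod (0 : Int) step = 0 := hdvd.mpr (dvd_zero _)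
        simp [this, Nat.zero_div]
      | succ m =>
        simp only [Nat.add_sub_cancel, if_neg (Nat.succ_ne_zero m)]
        have hsd : (m + 1) / step.natAbs
            = m / step.natAbs + if step.natAbs ∣ m + 1 then 1 else 0 := Nat.succ_div
        by_cases hd : step.natAbs ∣ m + 1
        · rw [if_pos (hdvd.mpr hd)]
          rw [hsd, if_pos hd]
          rcases Nat.even_or_odd (m / step.natAbs) with he | he <;>
            simp [Nat.even_iff, Nat.odd_iff] at he <;>
            simp [he, Nat.add_mod, Nat.mod_self]
        · rw [if_neg (fun h => hd (hdvd.mp h))]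
          rw [hsd, if_neg hd]
          simp
    have hcast : ((n : Int) + 1) = ((n + 1 : Nat) : Int) := by push_cast; ring
    rw [← hcast] at *
    rw [hstep, List.foldl_append, ih]
    simp only [List.foldl_cons, List.foldl_nil]
    rw [List.range_succ, List.map_append]
    refine Prod.ext ?_ ?_
    · simp only [hsmall]
      by_cases hp : (n / step.natAbs) % 2 = 1 <;> simp [hp]
    · simpa using hsmall

-- ===== VERDICT (by name: the statement is the Claim_ definition above) =====
theorem step_vel_file_spec : Claim_equal_step_vel_file := by
  intro step _ hs
  show step_vel_file step = step_vel_file_alt step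
  unfold step_vel_file step_vel_file_alt
  have h100 : ((100 : Int)) = ((100 : Nat) : Int) := by norm_num
  rw [h100, step_vel_loopA_eq step hs 100]
  rw [PySem.List.pyRange_one]
  simp only [List.map_map]
  refine List.map_congr_left ?_
  intro k _
  have hmod2 : PySem.Int.mod (((k / step.natAbs : Nat)) : Int) 2
      = ((k / step.natAbs % 2 : Nat) : Int) := by
    exact_mod_cast PySem.Int.mod_natCast (k / step.natAbs) 2
  simp only [Function.comp_apply, Int.zero_add, Int.abs_eq_natAbs,
    PySem.Int.floordiv_natCast, hmod2, Nat.cast_eq_one]
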